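-- pv_equiv track=rewrite | github.com/kanglinde/ee547-hw2-kanglinde | problem2/train_embeddings.py | encode_seq
-- ===== SOURCE A (Python) =====
-- def encode_seq(words, vocab_to_idx, fixed_len):
--     BoW = []
--     for w in words:
--         # pad or truncate to fixed length
--         if len(w) >= fixed_len:
--             abs = w[:fixed_len]  # truncate
--         else:
--             abs = w + [""] * (fixed_len - len(w))  # pad
--         # Convert abstract to sequence of indices
--         abs_idx = []
--         for word in abs:
--             if word in vocab_to_idx:
--                 abs_idx.append(vocab_to_idx[word])
--             else:
--                 abs_idx.append(0)
--         # Create bag_of_words representation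
--         bag_of_words = []
--         for v in vocab_to_idx:
--             val = 1 if abs_idx.count(vocab_to_idx[v]) > 0 else 0
--             bag_of_words.append(val)
--         BoW.append(bag_of_words)
--     return BoW
-- ===== SOURCE B (Python) =====
-- def encode_seq(words, vocab_to_idx, fixed_len):
--     # Precompute a reverse index: index value -> positions of the vocab keys carrying it.
--     keys = list(vocab_to_idx)
--     n = len(keys)
--     idx_to_positions = {}
--     for pos, k in enumerate(keys):
--         idx_to_positions.setdefault(vocab_to_idx[k], []).append(pos)
--     result = []
--     for w in words:
--         if len(w) >= fixed_len:
--             seq = w[:fixed_len]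
--         else:
--             seq = w + [""] * (fixed_len - len(w))
--         present = {vocab_to_idx.get(word, 0) for word in seq}
--         bag = [0] * n
--         for v in present:
--             for pos in idx_to_positions.get(v, []):
--                 bag[pos] = 1
--         result.append(bag)
--     return result
-- ===== Notes on version B (the rewrite author's own statement) =====
-- stated objective: faster
-- what changed: A rescans the whole padded index list once per vocab entry (count inside the per-vocab loop); B precomputes a reverse index value->positions once, then per sequence builds the set of present index values and scatters 1s onto their positions in a zero-initialized bag, removing the inner per-entry scan.
import Mathlib
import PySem

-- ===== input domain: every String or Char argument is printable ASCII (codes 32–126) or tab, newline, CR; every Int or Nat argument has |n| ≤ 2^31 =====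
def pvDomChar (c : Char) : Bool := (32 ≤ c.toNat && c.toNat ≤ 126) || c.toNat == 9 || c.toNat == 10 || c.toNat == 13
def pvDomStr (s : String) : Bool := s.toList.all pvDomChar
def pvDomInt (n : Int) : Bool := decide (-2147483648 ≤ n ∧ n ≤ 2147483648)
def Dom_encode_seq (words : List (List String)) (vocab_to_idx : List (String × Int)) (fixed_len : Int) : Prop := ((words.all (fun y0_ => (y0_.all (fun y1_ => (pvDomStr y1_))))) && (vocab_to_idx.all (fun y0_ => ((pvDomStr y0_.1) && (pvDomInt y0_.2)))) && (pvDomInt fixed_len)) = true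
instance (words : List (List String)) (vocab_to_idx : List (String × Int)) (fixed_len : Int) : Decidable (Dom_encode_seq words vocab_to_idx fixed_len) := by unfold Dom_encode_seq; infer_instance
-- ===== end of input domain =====

-- B replaces A's per-sequence scan of the whole vocab (with a count of the index list per entry) by a
-- precomputed reverse index value→positions and a scatter of the present index values; objective: faster.

-- ===== PORT A =====
def encode_seq (words : List (List String)) (vocab_to_idx : List (String × Int)) (fixed_len : Int) : List (List Int) :=
  let d := PySem.Dict.ofList vocab_to_idx
  words.foldl (fun BoW w =>
    let abs := if fixed_len ≤ (w.length : Int) then PySem.List.slice w none (some fixed_len)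
               else w ++ List.replicate (fixed_len - (w.length : Int)).toNat ""
    let abs_idx := abs.foldl (fun acc word =>
        acc ++ [if d.contains word then d.getD word 0 else 0]) []
    -- 'vocab_to_idx[v]' for v a key of the dict: getD never takes its default here
    let bag := d.keys.foldl (fun bag v =>
        bag ++ [if abs_idx.count (d.getD v 0) > 0 then (1 : Int) else 0]) []
    BoW ++ [bag]) []

-- ===== PORT B =====
def encode_seq_alt (words : List (List String)) (vocab_to_idx : List (String × Int)) (fixed_len : Int) : List (List Int) :=
  let d := PySem.Dict.ofList vocab_to_idx
  let keys := d.keys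
  let n := keys.length
  -- idx_to_positions: setdefault(v, []).append(pos) = modify v [] (· ++ [pos])
  let posd := (PySem.List.enumerate keys 0).foldl
      (fun pd p => pd.modify (d.getD p.2 0) [] (fun l => l ++ [p.1])) PySem.Dict.empty
  words.foldl (fun res w =>
    let seq := if fixed_len ≤ (w.length : Int) then PySem.List.slice w none (some fixed_len)
               else w ++ List.replicate (fixed_len - (w.length : Int)).toNat ""
    let present : PySem.Set Int := PySem.Set.ofList (seq.map (fun word => d.getD word 0))
    -- scatter: result independent of the set's iteration order (writes only 1s)
    let bag := present.foldl (fun bag v =>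
        (posd.getD v []).foldl (fun bag pos => PySem.List.pySetD bag pos 1) bag)
      (List.replicate n (0 : Int))
    res ++ [bag]) []

-- ===== PRECONDITION & SPEC =====
def Spec_encode_seq (words : List (List String)) (vocab_to_idx : List (String × Int)) (fixed_len : Int) (out : List (List Int)) : Prop := out = encode_seq_alt words vocab_to_idx fixed_len
instance (words : List (List String)) (vocab_to_idx : List (String × Int)) (fixed_len : Int) (out : List (List Int)) : Decidable (Spec_encode_seq words vocab_to_idx fixed_len out) := by unfold Spec_encode_seq; infer_instance

-- ===== CLAIM (what is proved, stated in full; the proofs are below) =====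
def Claim_equal_encode_seq : Prop := ∀ (words : List (List String)) (vocab_to_idx : List (String × Int)) (fixed_len : Int), Dom_encode_seq words vocab_to_idx fixed_len → Spec_encode_seq words vocab_to_idx fixed_len (encode_seq words vocab_to_idx fixed_len)

-- ===== LEMMAS AND PROOFS =====

-- the inner scatter loop: sets positions of ps (all nonnegative) to 1, preserving length
lemma scatter_length (ps : List Int) (bag : List Int) :
    (ps.foldl (fun b pos => PySem.List.pySetD b pos (1 : Int)) bag).length = bag.length := by
  induction ps generalizing bag with
  | nil => rfl
  | cons p ps ih => simp [List.foldl_cons, ih, PySem.List.length_pySetD]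

lemma scatter_getD (ps : List Int) (bag : List Int) (i : Nat) (hps : ∀ p ∈ ps, 0 ≤ p) :
    (ps.foldl (fun b pos => PySem.List.pySetD b pos (1 : Int)) bag).getD i 0
      = if (i : Int) ∈ ps ∧ i < bag.length then 1 else bag.getD i 0 := by
  induction ps generalizing bag with
  | nil => simp
  | cons p ps ih =>
    have hp : 0 ≤ p := hps p (by simp)
    rw [List.foldl_cons, ih _ (fun q hq => hps q (by simp [hq])),
        PySem.List.pySetD_of_nonneg _ _ hp]
    by_cases hlt : p.toNat < bag.length
    · by_cases hip : (i : Int) = p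
      · have : i = p.toNat := by omega
        subst this
        simp [List.getD_eq_getElem?_getD, hlt]
        omega
      · have hne : i ≠ p.toNat := by omega
        simp only [List.length_set]
        rw [List.getD_eq_getElem?_getD, List.getElem?_set, List.getD_eq_getElem?_getD]
        simp [List.mem_cons, hip, hne.symm]
    · have : bag.set p.toNat 1 = bag := List.set_eq_of_length_le (by omega)
      rw [this]
      by_cases hip : (i : Int) = p
      · have : ¬ i < bag.length := by omega
        simp [List.mem_cons, this]
      · simp [List.mem_cons, hip]

lemma scatterAll_length (S : List Int) (P : Int → List Int) (bag : List Int) :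
    (S.foldl (fun b v => (P v).foldl (fun b pos => PySem.List.pySetD b pos (1 : Int)) b) bag).length
      = bag.length := by
  induction S generalizing bag with
  | nil => rfl
  | cons v S ih => rw [List.foldl_cons, ih, scatter_length]

lemma scatterAll_getD (S : List Int) (P : Int → List Int) (bag : List Int) (i : Nat)
    (hP : ∀ v, ∀ p ∈ P v, 0 ≤ p) :
    (S.foldl (fun b v => (P v).foldl (fun b pos => PySem.List.pySetD b pos (1 : Int)) b) bag).getD i 0
      = if (∃ v ∈ S, (i : Int) ∈ P v) ∧ i < bag.length then 1 else bag.getD i 0 := by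
  induction S generalizing bag with
  | nil => simp
  | cons v S ih =>
    rw [List.foldl_cons, ih _ , scatter_getD _ _ _ (hP v), scatter_length]
    by_cases hi : i < bag.length
    · by_cases hv : (i : Int) ∈ P v
      · simp [hv, hi]
      · simp [hv, hi]
    · simp [hi]

lemma posd_getD_mem (keys : List String) (g : String → Int) (v j : Int) :
    (j ∈ ((PySem.List.enumerate keys 0).foldl
        (fun pd p => pd.modify (g p.2) [] (fun l => l ++ [p.1])) PySem.Dict.empty).getD v [])
    ↔ ∃ k : Nat, ∃ hk : k < keys.length, j = (k : Int) ∧ g (keys[k]'hk) = v := by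
  have h1 : (PySem.List.enumerate keys 0).foldl
        (fun pd p => pd.modify (g p.2) [] (fun l => l ++ [p.1])) PySem.Dict.empty
      = ((PySem.List.enumerate keys 0).map (fun p => (g p.2, p.1))).foldl
        (fun pd q => pd.modify q.1 [] (fun l => l ++ [q.2])) PySem.Dict.empty := by
    rw [List.foldl_map]
  rw [h1, PySem.Dict.getD_foldl_modify_append, PySem.Dict.getD_empty]
  simp only [List.nil_append, List.mem_map, List.mem_filter, List.mem_map,
    PySem.List.mem_enumerate_iff]
  constructor
  · rintro ⟨q, ⟨⟨p, ⟨k, hk, rfl⟩, rfl⟩, hv⟩, rfl⟩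
    exact ⟨k, hk, by simp, by simpa using hv⟩
  · rintro ⟨k, hk, rfl, hv⟩
    refine ⟨((g (keys[k]'hk)), (k : Int)), ⟨⟨(0 + (k : Int), keys[k]'hk), ⟨k, hk, rfl⟩, by simp⟩,
      by simpa using hv⟩, rfl⟩

lemma bag_eq (d : PySem.Dict String Int) (seq : List String) :
    d.keys.foldl (fun bag v =>
        bag ++ [if (seq.foldl (fun acc word =>
            acc ++ [if d.contains word then d.getD word 0 else 0]) []).count (d.getD v 0) > 0
          then (1 : Int) else 0]) []
    = (PySem.Set.ofList (seq.map (fun word => d.getD word 0))).foldl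
        (fun bag v => (((PySem.List.enumerate d.keys 0).foldl
            (fun pd p => pd.modify (d.getD p.2 0) [] (fun l => l ++ [p.1]))
            PySem.Dict.empty).getD v []).foldl
          (fun bag pos => PySem.List.pySetD bag pos 1) bag)
        (List.replicate d.keys.length 0) := by
  have habs : seq.foldl (fun acc word =>
      acc ++ [if d.contains word then d.getD word 0 else 0]) []
      = seq.map (fun word => d.getD word 0) := by
    rw [PySem.List.foldl_append_singleton_eq_map, List.nil_append]
    apply List.map_congr_left
    intro word _
    cases h : d.contains word with
    | true => simp
    | false => simp [PySem.Dict.getD_of_not_contains d 0 h]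
  rw [habs, PySem.List.foldl_append_singleton_eq_map, List.nil_append]
  set g : String → Int := fun word => d.getD word 0 with hg
  set vals := seq.map g with hvals
  set P : Int → List Int := fun v => ((PySem.List.enumerate d.keys 0).foldl
      (fun pd p => pd.modify (g p.2) [] (fun l => l ++ [p.1])) PySem.Dict.empty).getD v [] with hP
  have hPmem : ∀ v j, j ∈ P v ↔ ∃ k : Nat, ∃ hk : k < d.keys.length, j = (k : Int) ∧ g (d.keys[k]'hk) = v := by
    intro v j; rw [hP]; exact posd_getD_mem d.keys g v j
  have hPpos : ∀ v, ∀ p ∈ P v, 0 ≤ p := by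
    intro v p hp
    obtain ⟨k, hk, rfl, -⟩ := (hPmem v p).1 hp
    positivity
  apply List.ext_getElem
  · rw [List.length_map, scatterAll_length, List.length_replicate]
  · intro i h1 h2
    have hi : i < d.keys.length := by simpa using h1
    rw [List.getElem_map]
    rw [← List.getD_eq_getElem _ 0 h2, scatterAll_getD _ _ _ _ hPpos]
    have hcond : (∃ v ∈ PySem.Set.ofList vals, (i : Int) ∈ P v) ↔ d.getD (d.keys[i]'hi) 0 ∈ vals := by
      constructor
      · rintro ⟨v, hv, hiv⟩
        obtain ⟨k, hk, hik, hgk⟩ := (hPmem v _).1 hiv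
        have hki : i = k := by exact_mod_cast hik
        subst hki
        show g (d.keys[i]'hi) ∈ vals
        rw [hgk]
        exact (PySem.Set.mem_ofList _ _).1 hv
      · intro hmem
        exact ⟨d.getD (d.keys[i]'hi) 0, (PySem.Set.mem_ofList _ _).2 hmem,
          (hPmem _ _).2 ⟨i, hi, rfl, rfl⟩⟩
    rw [List.length_replicate]
    by_cases hmem : d.getD (d.keys[i]'hi) 0 ∈ vals
    · rw [if_pos (List.count_pos_iff.2 hmem), if_pos ⟨hcond.2 hmem, hi⟩]
    · rw [if_neg (fun h => hmem (List.count_pos_iff.1 h)),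
          if_neg (fun h => hmem (hcond.1 h.1))]
      simp

theorem encode_seq_spec : Claim_equal_encode_seq := by
  intro words vocab_to_idx fixed_len _
  show encode_seq words vocab_to_idx fixed_len = encode_seq_alt words vocab_to_idx fixed_len
  simp only [encode_seq, encode_seq_alt]
  rw [PySem.List.foldl_append_singleton_eq_map, PySem.List.foldl_append_singleton_eq_map,
    List.nil_append, List.nil_append]
  apply List.map_congr_left
  intro w _
  exact bag_eq (PySem.Dict.ofList vocab_to_idx) _
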